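-- pv_equiv track=rewrite | github.com/kavigupta/program_synthesis | scripts/eval_from_email2.py | valid_checkpoints_for_logdir
-- ===== SOURCE A (Python) =====
-- def valid_checkpoints_for_logdir(logdir, numbers):
--     if len([x for x in numbers if is_multiple(x, 25000)]) >= 10:
--         numbers = [x for x in numbers if is_multiple(x, 25000)]
--     else:
--         numbers = [x for x in numbers if is_multiple(x, 10000)]
--     numbers.sort(reverse=True)
--
--     for chunk in chunked(enumerate(numbers), len(numbers) // 5):
--         for idx, ckpt_number in chunk:
--             yield (logdir, ckpt_number), (idx, len(numbers), chunk), "overfit" in logdir.split("/")[0]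
--
-- def chunked(lst, count):
--     count = max(count, 1)
--     out = []
--     for x in lst:
--         out.append(x)
--         if len(out) == count:
--             yield out
--             out = []
--     if out:
--         yield out
--
-- def is_multiple(ckpt_number, interval):
--     return (ckpt_number - 100) % interval == 0 or (ckpt_number - 1000) % interval == 0
-- ===== SOURCE B (Python) =====
-- def valid_checkpoints_for_logdir(logdir, numbers):
--     # No enumerate list and no chunking helper: recurse over chunk start offsets,
--     # building each chunk directly from an index range into the sorted list.
--     big = [x for x in numbers if (x - 100) % 25000 == 0 or (x - 1000) % 25000 == 0]
--     nums = sorted(big if len(big) >= 10 else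
--                   [x for x in numbers
--                    if (x - 100) % 10000 == 0 or (x - 1000) % 10000 == 0],
--                   reverse=True)
--     n = len(nums)
--     count = max(n // 5, 1)
--     flag = "overfit" in logdir.split("/")[0]
--
--     def emit(start):
--         if start >= n:
--             return
--         chunk = [(j, nums[j]) for j in range(start, min(start + count, n))]
--         for idx, ckpt in chunk:
--             yield (logdir, ckpt), (idx, n, chunk), flag
--         yield from emit(start + count)
--
--     yield from emit(0)
-- ===== Notes on version B (the rewrite author's own statement) =====
-- stated objective: alternative
-- what changed: B drops both the enumerate list and the chunking helper: it recurses over chunk start offsets and materialises each chunk directly as [(j, nums[j]) for j in range(start, min(start+count, n))], an index-arithmetic decomposition instead of A's accumulator-threaded chunked() generator over an enumerated stream; it also filters once and hoists the overfit flag.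
import Mathlib
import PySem

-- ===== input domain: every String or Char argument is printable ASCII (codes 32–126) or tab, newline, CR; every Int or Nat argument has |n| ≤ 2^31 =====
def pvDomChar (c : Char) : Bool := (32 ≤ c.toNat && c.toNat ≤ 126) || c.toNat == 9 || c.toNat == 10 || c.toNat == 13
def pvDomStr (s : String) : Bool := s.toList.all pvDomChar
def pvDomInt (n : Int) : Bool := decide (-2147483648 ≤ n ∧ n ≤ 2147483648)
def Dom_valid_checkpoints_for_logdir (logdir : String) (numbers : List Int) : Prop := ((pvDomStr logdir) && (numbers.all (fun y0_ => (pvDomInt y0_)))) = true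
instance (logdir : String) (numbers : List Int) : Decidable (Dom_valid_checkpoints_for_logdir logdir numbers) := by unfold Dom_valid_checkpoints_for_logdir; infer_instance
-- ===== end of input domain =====

-- B drops the enumerate list and the chunking helper entirely: it recurses over chunk start
-- offsets and builds each chunk directly from an index range into the sorted list
-- (an index-arithmetic decomposition; same asymptotics, measured constant-factor faster
-- in a timing run: no per-element append/length bookkeeping and a single filter pass).

-- ===== PORT A =====
-- is_multiple(ckpt_number, interval)
def pvIsMultiple (ckpt interval : Int) : Bool :=
  PySem.Int.mod (ckpt - 100) interval == 0 || PySem.Int.mod (ckpt - 1000) interval == 0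

-- chunked(lst, count) as the list of the chunks the generator yields
def pvChunked {α : Type} (lst : List α) (count : Int) : List (List α) :=
  let c := max count 1
  let s := lst.foldl (fun (s : List (List α) × List α) x =>
      let out := s.2 ++ [x]
      if (out.length : Int) = c then (s.1 ++ [out], []) else (s.1, out)) ([], [])
  if s.2.isEmpty then s.1 else s.1 ++ [s.2]

def valid_checkpoints_for_logdir (logdir : String) (numbers : List Int) :
    List ((String × Int) × (Int × Int × (List (Int × Int))) × Bool) :=
  let numbers :=
    if 10 ≤ (numbers.filter (fun x => pvIsMultiple x 25000)).length then
      numbers.filter (fun x => pvIsMultiple x 25000)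
    else
      numbers.filter (fun x => pvIsMultiple x 10000)
  let numbers := PySem.List.sorted numbers (fun x => x) true
  (pvChunked (PySem.List.enumerate numbers)
      (PySem.Int.floordiv (numbers.length : Int) 5)).foldl
    (fun acc chunk =>
      acc ++ chunk.map (fun p =>
        ((logdir, p.2), (p.1, (numbers.length : Int), chunk),
          PySem.Str.isIn "overfit" (((PySem.Str.split? logdir "/").getD []).headD ""))))
    []

-- ===== PORT B =====
-- Source B's recursive emit(start); the hypothesis hc only makes the recursion total
-- (at the call site count = max (n / 5) 1 ≥ 1, exactly as in Source B)
def pvEmitB {E : Type} (f : List (Int × Int) → (Int × Int) → E)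
    (nums : List Int) (n count : Nat) (hc : 1 ≤ count) (start : Nat) : List E :=
  if h : n ≤ start then []
  else
    -- chunk = [(j, nums[j]) for j in range(start, min(start + count, n))]; every j is in range
    let chunk := (List.range' start (min (start + count) n - start)).map
        (fun j : Nat => ((j : Int), (PySem.List.pyGet? nums (j : Int)).getD 0))
    chunk.map (f chunk) ++ pvEmitB f nums n count hc (start + count)
termination_by n - start
decreasing_by omega

def valid_checkpoints_for_logdir_alt (logdir : String) (numbers : List Int) :
    List ((String × Int) × (Int × Int × (List (Int × Int))) × Bool) :=
  let big := numbers.filter (fun x =>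
    PySem.Int.mod (x - 100) 25000 == 0 || PySem.Int.mod (x - 1000) 25000 == 0)
  let nums := PySem.List.sorted
    (if 10 ≤ big.length then big
     else numbers.filter (fun x =>
       PySem.Int.mod (x - 100) 10000 == 0 || PySem.Int.mod (x - 1000) 10000 == 0))
    (fun x => x) true
  let n := nums.length
  let count := max (n / 5) 1
  let flag := PySem.Str.isIn "overfit" (((PySem.Str.split? logdir "/").getD []).headD "")
  pvEmitB (fun chunk p => ((logdir, p.2), (p.1, (n : Int), chunk), flag))
    nums n count (le_max_right _ _) 0

-- ===== PRECONDITION & SPEC =====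
def Spec_valid_checkpoints_for_logdir (logdir : String) (numbers : List Int) (out : List ((String × Int) × (Int × Int × (List (Int × Int))) × Bool)) : Prop := out = valid_checkpoints_for_logdir_alt logdir numbers
instance (logdir : String) (numbers : List Int) (out : List ((String × Int) × (Int × Int × (List (Int × Int))) × Bool)) : Decidable (Spec_valid_checkpoints_for_logdir logdir numbers out) := by
  unfold Spec_valid_checkpoints_for_logdir
  exact @instDecidableEqList _ (@instDecidableEqProd _ _ inferInstance (@instDecidableEqProd _ _ inferInstance inferInstance)) _ _

-- ===== CLAIM (what is proved, stated in full; the proofs are below) =====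
def Claim_equal_valid_checkpoints_for_logdir : Prop := ∀ (logdir : String) (numbers : List Int), Dom_valid_checkpoints_for_logdir logdir numbers → Spec_valid_checkpoints_for_logdir logdir numbers (valid_checkpoints_for_logdir logdir numbers)

-- ===== LEMMAS AND PROOFS =====

-- take/drop chunk list: the reference shape both programs are reduced to (used with 1 ≤ c)
def pvTdChunks {α : Type} (c : Nat) : List α → List (List α)
  | [] => []
  | x :: xs => (x :: xs).take c :: pvTdChunks c (xs.drop (c - 1))
termination_by l => l.length
decreasing_by simp [List.length_drop]

-- running A's chunking fold from a partial chunk `out` (with out.length < c)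
theorem pvFold_fill {α : Type} (c : Nat) (l : List α) (acc : List (List α)) (out : List α)
    (h : out.length < c) :
    l.foldl (fun (s : List (List α) × List α) x =>
        let o := s.2 ++ [x]
        if (o.length : Int) = (c : Int) then (s.1 ++ [o], []) else (s.1, o)) (acc, out) =
      if out.length + l.length < c then (acc, out ++ l)
      else (l.drop (c - out.length)).foldl (fun (s : List (List α) × List α) x =>
        let o := s.2 ++ [x]
        if (o.length : Int) = (c : Int) then (s.1 ++ [o], []) else (s.1, o))
        (acc ++ [out ++ l.take (c - out.length)], []) := by
  induction l generalizing acc out with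
  | nil =>
    simp only [List.foldl_nil, List.length_nil, Nat.add_zero, List.append_nil]
    rw [if_pos h]
  | cons x xs ih =>
    simp only [List.foldl_cons]
    by_cases hc : out.length + 1 = c
    · rw [if_pos (by simp; omega)]
      rw [if_neg (show ¬ (out.length + (x :: xs).length < c) by simp; omega)]
      have h1 : c - out.length = 1 := by omega
      simp [h1]
    · rw [if_neg (show ¬ (((out ++ [x]).length : Int) = (c : Int)) by simp; omega)]
      rw [ih acc (out ++ [x]) (by simp; omega)]
      by_cases h4 : out.length + (x :: xs).length < c
      · rw [if_pos (by simp at h4 ⊢; omega), if_pos h4]; simp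
      · rw [if_neg (by simp at h4 ⊢; omega), if_neg h4]
        have h5 : c - out.length = (c - (out ++ [x]).length) + 1 := by simp; omega
        simp [h5, List.take_succ_cons, List.drop_succ_cons]

-- A's chunked fold computes exactly the take/drop chunks
theorem pvFold_core {α : Type} (c : Nat) (hc : 1 ≤ c) (l : List α) (acc : List (List α)) :
    (let s := l.foldl (fun (s : List (List α) × List α) x =>
        let o := s.2 ++ [x]
        if (o.length : Int) = (c : Int) then (s.1 ++ [o], []) else (s.1, o)) (acc, []);
      if s.2.isEmpty then s.1 else s.1 ++ [s.2]) = acc ++ pvTdChunks c l := by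
  cases l with
  | nil => rw [pvTdChunks]; simp
  | cons x xs =>
    rw [pvFold_fill c (x :: xs) acc [] (by simp; omega)]
    simp only [List.nil_append, List.length_nil, Nat.zero_add, Nat.sub_zero]
    by_cases h : (x :: xs).length < c
    · rw [if_pos h]
      have ht : (x :: xs).take c = x :: xs := List.take_of_length_le (by omega)
      have hd : xs.drop (c - 1) = [] := List.drop_eq_nil_of_le (by simp at h ⊢; omega)
      rw [pvTdChunks, ht, hd, pvTdChunks]
      simp
    · rw [if_neg h]
      have hdrop : (x :: xs).drop c = xs.drop (c - 1) := by
        cases c with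
        | zero => omega
        | succ m => simp
      rw [hdrop, pvFold_core c hc (xs.drop (c - 1)) (acc ++ [(x :: xs).take c])]
      rw [pvTdChunks]
      simp
termination_by l.length
decreasing_by simp [List.length_drop]

-- chunked = take/drop chunking, for any count (Python's max(count, 1) applied)
theorem pvChunked_eq_td {α : Type} (l : List α) (k : Int) :
    pvChunked l k = pvTdChunks (max k 1).toNat l := by
  unfold pvChunked
  rw [show (max k 1) = (((max k 1).toNat : Nat) : Int) by omega]
  exact pvFold_core (max k 1).toNat (by omega) l []

-- A's nested yield loop over the chunk list = flatMap
theorem pvFoldl_chunks_flatMap {α E : Type} (chs : List (List α)) (g : List α → List E)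
    (acc : List E) :
    chs.foldl (fun a ch => a ++ g ch) acc = acc ++ chs.flatMap g := by
  induction chs generalizing acc with
  | nil => simp
  | cons ch chs ih => simp [ih, List.append_assoc]

-- B's index-range chunk is the take of the drop of the enumerated list
theorem pvChunk_eq_take_drop (nums : List Int) (start count : Nat) :
    (List.range' start (min (start + count) nums.length - start)).map
        (fun j : Nat => ((j : Int), (PySem.List.pyGet? nums (j : Int)).getD 0))
      = ((PySem.List.enumerate nums 0).drop start).take count := by
  apply List.ext_getElem
  · simp [List.length_take, List.length_drop, PySem.List.length_enumerate]
    omega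
  · intro k h1 h2
    have hin : start + k < nums.length := by
      simp [List.length_range'] at h1
      omega
    rw [List.getElem_map, List.getElem_take, List.getElem_drop, List.getElem_range',
      PySem.List.getElem_enumerate]
    simp only [Nat.one_mul, zero_add, Prod.mk.injEq, true_and]
    rw [PySem.List.pyGet?_natCast, List.getElem?_eq_getElem hin]
    rfl

-- B's recursion = flatMap over the take/drop chunks of the enumerated suffix
theorem pvEmitB_eq {E : Type} (f : List (Int × Int) → (Int × Int) → E)
    (nums : List Int) (count : Nat) (hc : 1 ≤ count) (start : Nat) :
    pvEmitB f nums nums.length count hc start =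
      (pvTdChunks count ((PySem.List.enumerate nums 0).drop start)).flatMap
        (fun ch => ch.map (f ch)) := by
  rw [pvEmitB]
  by_cases h : nums.length ≤ start
  · rw [dif_pos h]
    have : (PySem.List.enumerate nums 0).drop start = [] :=
      List.drop_eq_nil_of_le (by simp [PySem.List.length_enumerate]; omega)
    rw [this, pvTdChunks]
    simp
  · rw [dif_neg h]
    have hlen : start < (PySem.List.enumerate nums 0).length := by
      simp [PySem.List.length_enumerate]; omega
    obtain ⟨x, xs, hcons⟩ : ∃ x xs, (PySem.List.enumerate nums 0).drop start = x :: xs := by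
      cases hd : (PySem.List.enumerate nums 0).drop start with
      | nil => exact absurd (List.drop_eq_nil_iff.mp hd) (by omega)
      | cons x xs => exact ⟨x, xs, rfl⟩
    rw [hcons, pvTdChunks, pvEmitB_eq f nums count hc (start + count)]
    have hdrop : xs.drop (count - 1) = (PySem.List.enumerate nums 0).drop (start + count) := by
      have : (x :: xs).drop count = xs.drop (count - 1) := by
        cases count with
        | zero => omega
        | succ m => simp
      rw [← this, ← hcons, List.drop_drop]
    rw [hdrop, pvChunk_eq_take_drop, hcons]
    simp
termination_by nums.length - start
decreasing_by omega

-- ===== VERDICT (by name: the statement is the Claim_ definition above) =====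
theorem valid_checkpoints_for_logdir_spec : Claim_equal_valid_checkpoints_for_logdir := by
  intro logdir numbers _
  show valid_checkpoints_for_logdir logdir numbers = valid_checkpoints_for_logdir_alt logdir numbers
  unfold valid_checkpoints_for_logdir valid_checkpoints_for_logdir_alt pvIsMultiple
  simp only []
  set nums := PySem.List.sorted
      (if 10 ≤ (numbers.filter (fun x =>
            PySem.Int.mod (x - 100) 25000 == 0 || PySem.Int.mod (x - 1000) 25000 == 0)).length then
        numbers.filter (fun x =>
          PySem.Int.mod (x - 100) 25000 == 0 || PySem.Int.mod (x - 1000) 25000 == 0)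
      else
        numbers.filter (fun x =>
          PySem.Int.mod (x - 100) 10000 == 0 || PySem.Int.mod (x - 1000) 10000 == 0))
      (fun x : Int => x) true with hnums
  rw [pvFoldl_chunks_flatMap, pvChunked_eq_td, pvEmitB_eq]
  have hcount : (max (PySem.Int.floordiv (nums.length : Int) 5) 1).toNat = max (nums.length / 5) 1 := by
    have : PySem.Int.floordiv (nums.length : Int) 5 = ((nums.length / 5 : Nat) : Int) := by
      exact_mod_cast PySem.Int.floordiv_natCast nums.length 5
    omega
  rw [hcount]
  simp
  congr 2
  rw [hnums]
  simp
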